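-- pv_equiv track=rewrite | github.com/nicolajack/BUCS111 | ps2/lab4?.py | negate_evens
-- ===== SOURCE A (Python) =====
-- def negate_evens(vals):
--     if vals == []:
--         return []
--     else:
--         rest_negated = negate_evens(vals[1:])
--         if vals[0] % 2 == 0:
--             return [-vals[0]] + rest_negated
--         else:
--             return [vals[0]] + rest_negated
-- ===== SOURCE B (Python) =====
-- def negate_evens(vals):
--     result = []
--     for x in vals:
--         if x % 2 == 0:
--             result.append(-x)
--         else:
--             result.append(x)
--     return result
-- ===== Notes on version B (the rewrite author's own statement) =====
-- stated objective: idiomatic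
-- what changed: Replaces head/tail recursion building the list by repeated concatenation with a single iterative forward loop appending to an accumulator.
import Mathlib
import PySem

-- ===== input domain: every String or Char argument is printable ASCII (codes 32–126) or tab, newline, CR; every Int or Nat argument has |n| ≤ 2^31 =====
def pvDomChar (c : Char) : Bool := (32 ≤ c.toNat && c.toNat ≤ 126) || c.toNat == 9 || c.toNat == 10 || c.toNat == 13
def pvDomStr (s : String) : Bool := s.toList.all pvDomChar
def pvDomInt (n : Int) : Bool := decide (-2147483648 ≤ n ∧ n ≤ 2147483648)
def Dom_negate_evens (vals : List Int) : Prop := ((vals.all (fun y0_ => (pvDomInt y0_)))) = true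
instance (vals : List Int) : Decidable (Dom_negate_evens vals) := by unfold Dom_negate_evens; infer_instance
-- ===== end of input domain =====

-- B replaces A's tail recursion with list concatenation by an iterative accumulator loop (objective: idiomatic, linear instead of quadratic list building).

-- ===== PORT A =====
def negate_evens (vals : List Int) : List Int :=
  match vals with
  | [] => []
  | v :: vs =>
    let rest_negated := negate_evens vs   -- negate_evens(vals[1:])
    if PySem.Int.mod v 2 = 0 then (-v) :: rest_negated else v :: rest_negated

-- ===== PORT B =====
def negate_evens_alt (vals : List Int) : List Int :=
  vals.foldl (fun result x => result ++ (if PySem.Int.mod x 2 = 0 then [-x] else [x])) []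

-- ===== PRECONDITION & SPEC =====
def Spec_negate_evens (vals : List Int) (out : List Int) : Prop := out = negate_evens_alt vals
instance (vals : List Int) (out : List Int) : Decidable (Spec_negate_evens vals out) := by unfold Spec_negate_evens; infer_instance

-- ===== CLAIM (what is proved, stated in full; the proofs are below) =====
def Claim_equal_negate_evens : Prop := ∀ (vals : List Int), Dom_negate_evens vals → Spec_negate_evens vals (negate_evens vals)

-- ===== LEMMAS AND PROOFS =====
theorem negate_evens_foldl (vals : List Int) (acc : List Int) :
    vals.foldl (fun result x => result ++ (if PySem.Int.mod x 2 = 0 then [-x] else [x])) acc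
      = acc ++ negate_evens vals := by
  induction vals generalizing acc with
  | nil => simp [negate_evens]
  | cons v vs ih =>
    simp only [List.foldl, negate_evens, ih]
    split <;> simp

-- ===== VERDICT (by name: the statement is the Claim_ definition above) =====
theorem negate_evens_spec : Claim_equal_negate_evens := by
  intro vals _
  unfold Spec_negate_evens negate_evens_alt
  rw [negate_evens_foldl]
  rfl
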